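-- pv_equiv track=rewrite | github.com/gaconpro1991-sudo/Match3_AutoTool | matcher.py | analyze_matches
-- ===== SOURCE A (Python) =====
-- def analyze_matches(board):
--     rows, cols = len(board), len(board[0])
--     matches = []
--     score = 0
--
--     # horizontal
--     for r in range(rows):
--         cnt = 1
--         for c in range(1, cols):
--             if board[r][c] == board[r][c-1] and board[r][c] is not None:
--                 cnt += 1
--             else:
--                 if cnt >= 3:
--                     matches.append(cnt)
--                 cnt = 1
--         if cnt >= 3:
--             matches.append(cnt)
--
--     # vertical
--     for c in range(cols):
--         cnt = 1
--         for r in range(1, rows):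
--             if board[r][c] == board[r-1][c] and board[r][c] is not None:
--                 cnt += 1
--             else:
--                 if cnt >= 3:
--                     matches.append(cnt)
--                 cnt = 1
--         if cnt >= 3:
--             matches.append(cnt)
--
--     for m in matches:
--         if m == 3:
--             score += 3
--         elif m == 4:
--             score += 8
--         else:
--             score += 15
--
--     return score, matches
-- ===== SOURCE B (Python) =====
-- def _runs(seq):
--     """Lengths (>=3) of maximal runs of equal non-None values, via two pointers."""
--     out = []
--     i, n = 0, len(seq)
--     while i < n:
--         j = i
--         while j < n and seq[j] == seq[i]:
--             j += 1
--         if seq[i] is not None and j - i >= 3: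
--             out.append(j - i)
--         i = j
--     return out
--
-- def analyze_matches(board):
--     rows, cols = len(board), len(board[0])
--     matches = []
--     for row in board:
--         matches += _runs(row[:cols])
--     for c in range(cols):
--         matches += _runs([board[r][c] for r in range(rows)])
--     score = sum(3 if m == 3 else 8 if m == 4 else 15 for m in matches)
--     return score, matches
-- ===== Notes on version B (the rewrite author's own statement) =====
-- stated objective: alternative
-- what changed: Replaces A's two counter-reset index loops (with a duplicated flush-at-end step) by a single two-pointer maximal-run helper applied to each row and each explicitly built column sequence, with the score computed by a sum comprehension instead of a third loop.
import Mathlib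
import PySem

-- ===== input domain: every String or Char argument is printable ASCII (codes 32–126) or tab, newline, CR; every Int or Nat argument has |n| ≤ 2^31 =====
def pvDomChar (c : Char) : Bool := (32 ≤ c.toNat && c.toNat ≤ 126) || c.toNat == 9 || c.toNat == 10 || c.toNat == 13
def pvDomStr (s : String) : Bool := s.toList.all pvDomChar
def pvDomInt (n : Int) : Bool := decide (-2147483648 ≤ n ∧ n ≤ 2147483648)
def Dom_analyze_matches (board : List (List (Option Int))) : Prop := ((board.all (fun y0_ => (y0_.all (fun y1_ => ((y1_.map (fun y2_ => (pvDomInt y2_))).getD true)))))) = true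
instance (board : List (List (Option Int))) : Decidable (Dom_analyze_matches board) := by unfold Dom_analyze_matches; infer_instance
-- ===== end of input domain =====

-- B re-implements the run detection with a per-sequence helper (two-pointer maximal-run scan over
-- explicit row/column sequences) instead of A's counter-reset index loops; objective: simpler decomposition.

-- ===== PORT A =====
-- A's inner-loop body and run flush, shared by its horizontal and vertical loops.
def stepA (prev cur : Option Int) (st : List Int × Nat) : List Int × Nat :=
  if cur = prev ∧ cur ≠ none then (st.1, st.2 + 1)
  else (if st.2 ≥ 3 then st.1 ++ [(st.2 : Int)] else st.1, 1)

def finishA (st : List Int × Nat) : List Int :=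
  if st.2 ≥ 3 then st.1 ++ [(st.2 : Int)] else st.1

def analyze_matches (board : List (List (Option Int))) : Int × List Int :=
  let rows := board.length
  let cols := (board.getD 0 []).length
  -- horizontal
  let ms0 : List Int := (List.range rows).foldl
    (fun ms r =>
      let row := board.getD r []
      finishA ((List.range' 1 (cols - 1)).foldl
        (fun st c => stepA (row.getD (c - 1) none) (row.getD c none) st) (ms, 1))) []
  -- vertical
  let ms1 := (List.range cols).foldl
    (fun ms c =>
      finishA ((List.range' 1 (rows - 1)).foldl
        (fun st r => stepA ((board.getD (r - 1) []).getD c none) ((board.getD r []).getD c none) st) (ms, 1))) ms0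
  let score := ms1.foldl (fun s m => if m = 3 then s + 3 else if m = 4 then s + 8 else s + 15) (0 : Int)
  (score, ms1)

-- ===== PORT B =====
-- length of B's inner `while j < n and seq[j] == seq[i]` advance past position i
def runSpan (x : Option Int) : List (Option Int) → Nat
  | [] => 0
  | y :: t => if y = x then runSpan x t + 1 else 0

theorem runSpan_le (x : Option Int) (t : List (Option Int)) : runSpan x t ≤ t.length := by
  induction t with
  | nil => simp [runSpan]
  | cons y t ih => simp only [runSpan, List.length_cons]; split <;> omega

-- B's _runs: two-pointer scan over a 1-D sequence
def runsB : List (Option Int) → List Int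
  | [] => []
  | x :: t =>
    let s := runSpan x t
    (if x ≠ none ∧ s + 1 ≥ 3 then [((s : Int) + 1)] else []) ++ runsB (t.drop s)
termination_by l => l.length
decreasing_by
  simp only [List.length_drop, List.length_cons]
  have := runSpan_le x t
  omega

def analyze_matches_alt (board : List (List (Option Int))) : Int × List Int :=
  let rows := board.length
  let cols := (board.getD 0 []).length
  let ms0 := board.foldl (fun ms row => ms ++ runsB (row.take cols)) []
  let ms1 := (List.range cols).foldl
    (fun ms c => ms ++ runsB ((List.range rows).map (fun r => (board.getD r []).getD c none))) ms0
  let score := ms1.foldl (fun s m => s + (if m = 3 then 3 else if m = 4 then 8 else 15)) (0 : Int)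
  (score, ms1)

-- ===== PRECONDITION & SPEC =====
-- Exactly the inputs on which the Python A returns: a nonempty board whose rows are all at least
-- as long as the first row (otherwise A raises IndexError).
def Pre_analyze_matches (board : List (List (Option Int))) : Prop :=
  board ≠ [] ∧ ∀ row ∈ board, (board.headI).length ≤ row.length

instance (board : List (List (Option Int))) : Decidable (Pre_analyze_matches board) := by
  unfold Pre_analyze_matches; infer_instance

def pvWitness_analyze_matches : List (List (Option Int)) :=
  [[some 1, some 1, some 1], [some 1, some 2, none], [some 1, some 2, some 2]]

def Spec_analyze_matches (board : List (List (Option Int))) (out : Int × List Int) : Prop := out = analyze_matches_alt board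
instance (board : List (List (Option Int))) (out : Int × List Int) : Decidable (Spec_analyze_matches board out) := by unfold Spec_analyze_matches; infer_instance

-- ===== CLAIM (what is proved, stated in full; the proofs are below) =====
def Claim_equal_analyze_matches : Prop := ∀ (board : List (List (Option Int))), Dom_analyze_matches board → Pre_analyze_matches board → Spec_analyze_matches board (analyze_matches board)

-- ===== LEMMAS AND PROOFS =====

-- state-machine reformulation of A's inner loop, threading the previous element
def scanA : Option Int → List Int × Nat → List (Option Int) → List Int × Nat
  | _, st, [] => st
  | p, st, c :: t => scanA c (stepA p c st) t

theorem pairs_eq (l : List (Option Int)) :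
    (List.range' 1 (l.length - 1)).map (fun c => (l.getD (c - 1) none, l.getD c none)) =
      l.zip l.tail := by
  apply List.ext_getElem
  · simp only [List.length_map, List.length_range', List.length_zip, List.length_tail]
    omega
  · intro i h1 h2
    simp only [List.length_map, List.length_range'] at h1
    have hi : i < l.length := by omega
    have hi1 : i + 1 < l.length := by omega
    simp only [List.getElem_map, List.getElem_range', List.getElem_zip, List.getElem_tail]
    rw [List.getD_eq_getElem _ _ (by omega), List.getD_eq_getElem _ _ (by omega)]
    simp only [show 1 + 1 * i = i + 1 from by omega]
    rfl

theorem zip_scan (t : List (Option Int)) : ∀ (x : Option Int) (st : List Int × Nat),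
    ((x :: t).zip t).foldl (fun st p => stepA p.1 p.2 st) st = scanA x st t := by
  induction t with
  | nil => intro x st; rfl
  | cons y t ih => intro x st; simp only [List.zip_cons_cons, List.foldl_cons, scanA]; exact ih y _

theorem scan_runs (t : List (Option Int)) : ∀ (x : Option Int) (ms : List Int) (cnt : Nat),
    1 ≤ cnt → (x = none → cnt = 1) →
    finishA (scanA x (ms, cnt) t) =
      (if x ≠ none ∧ cnt + runSpan x t ≥ 3 then ms ++ [((cnt + runSpan x t : Nat) : Int)] else ms)
        ++ runsB (t.drop (runSpan x t)) := by
  induction t with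
  | nil =>
    intro x ms cnt h1 hn
    simp only [scanA, runSpan, List.drop_nil, runsB, List.append_nil, finishA, Nat.add_zero]
    by_cases hx : x = none
    · have := hn hx; subst this; simp [hx]
    · simp [hx]
  | cons y t ih =>
    intro x ms cnt h1 hn
    by_cases hcase : y = x ∧ y ≠ none
    · obtain ⟨hyx, hyn⟩ := hcase
      subst hyx
      have hstep : stepA y y (ms, cnt) = (ms, cnt + 1) := by simp [stepA, hyn]
      simp only [scanA, hstep]
      rw [ih y ms (cnt + 1) (by omega) (fun h => absurd h hyn)]
      have hr : runSpan y (y :: t) = runSpan y t + 1 := by simp [runSpan]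
      rw [hr, List.drop_succ_cons, show cnt + (runSpan y t + 1) = cnt + 1 + runSpan y t from by omega]
    · -- reset step
      have hstep : stepA x y (ms, cnt) = ((if cnt ≥ 3 then ms ++ [(cnt : Int)] else ms), 1) := by
        simp only [stepA]
        rw [if_neg]
        intro hcontra
        exact hcase ⟨hcontra.1, hcontra.2⟩
      simp only [scanA, hstep]
      rw [ih y _ 1 (by omega) (fun _ => rfl)]
      by_cases hyx : y = x
      · -- then x = none (otherwise hcase would hold), so y = none and cnt = 1
        have hxn : x = none := by
          by_contra hxn
          exact hcase ⟨hyx, hyx ▸ hxn⟩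
        have hyn : y = none := hyx.trans hxn
        have hc1 : cnt = 1 := hn hxn
        subst hc1
        have hr : runSpan x (y :: t) = runSpan x t + 1 := by simp [runSpan, hyx]
        rw [hr, List.drop_succ_cons]
        simp [hxn, hyn]
      · simp only [runSpan, if_neg hyx, List.drop_zero, Nat.add_zero]
        have hxpart : (if x ≠ none ∧ cnt ≥ 3 then ms ++ [(cnt : Int)] else ms)
            = (if cnt ≥ 3 then ms ++ [(cnt : Int)] else ms) := by
          by_cases hxn : x = none
          · have := hn hxn; subst this; simp
          · simp [hxn]
        rw [hxpart]
        conv_rhs => rw [show runsB (y :: t) = (if y ≠ none ∧ runSpan y t + 1 ≥ 3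
          then [((runSpan y t : Int) + 1)] else []) ++ runsB (t.drop (runSpan y t)) from by
            rw [runsB]]
        rw [← List.append_assoc]
        congr 1
        rw [show 1 + runSpan y t = runSpan y t + 1 from by omega]
        by_cases hc : y ≠ none ∧ runSpan y t + 1 ≥ 3
        · rw [if_pos hc, if_pos hc]
          rw [show ((runSpan y t + 1 : Nat) : Int) = ((runSpan y t : Nat) : Int) + 1 from by push_cast; ring]
        · rw [if_neg hc, if_neg hc, List.append_nil]

-- A's whole inner loop on a 1-D sequence l produces exactly ms ++ runsB l
theorem rowEq (l : List (Option Int)) (ms : List Int) :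
    finishA ((List.range' 1 (l.length - 1)).foldl
      (fun st c => stepA (l.getD (c - 1) none) (l.getD c none) st) (ms, 1)) = ms ++ runsB l := by
  cases l with
  | nil => simp [finishA, runsB]
  | cons x t =>
    have h0 : (List.range' 1 ((x :: t).length - 1)).foldl
        (fun st c => stepA ((x :: t).getD (c - 1) none) ((x :: t).getD c none) st) (ms, 1)
        = ((List.range' 1 ((x :: t).length - 1)).map
            (fun c => ((x :: t).getD (c - 1) none, (x :: t).getD c none))).foldl
            (fun st p => stepA p.1 p.2 st) (ms, 1) := by
      rw [List.foldl_map]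
    rw [h0, pairs_eq]
    simp only [List.tail_cons]
    rw [zip_scan, scan_runs t x ms 1 (le_refl 1) (fun _ => rfl)]
    rw [show runsB (x :: t) = (if x ≠ none ∧ runSpan x t + 1 ≥ 3
          then [((runSpan x t : Int) + 1)] else []) ++ runsB (t.drop (runSpan x t)) from by
            rw [runsB]]
    rw [← List.append_assoc]
    congr 1
    rw [show 1 + runSpan x t = runSpan x t + 1 from by omega]
    by_cases hc : x ≠ none ∧ runSpan x t + 1 ≥ 3
    · rw [if_pos hc, if_pos hc]
      rw [show ((runSpan x t + 1 : Nat) : Int) = ((runSpan x t : Nat) : Int) + 1 from by push_cast; ring]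
    · rw [if_neg hc, if_neg hc, List.append_nil]

theorem foldl_range_getD {α β : Type} (d : α) (g : β → α → β) (l : List α) :
    ∀ (st : β), (List.range l.length).foldl (fun st r => g st (l.getD r d)) st = l.foldl g st := by
  induction l with
  | nil => intro st; rfl
  | cons x t ih =>
    intro st
    rw [List.length_cons, List.range_succ_eq_map, List.foldl_cons, List.foldl_map]
    simp only [List.getD_cons_zero, List.getD_cons_succ]
    exact ih (g st x)

theorem getD_take {α : Type} (l : List α) (n i : Nat) (d : α) (h : i < n) :
    (l.take n).getD i d = l.getD i d := by
  by_cases hi : i < l.length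
  · rw [List.getD_eq_getElem _ _ (by simp; omega), List.getD_eq_getElem _ _ hi, List.getElem_take]
  · rw [List.getD_eq_default _ _ (by simp; omega), List.getD_eq_default _ _ (by omega)]

theorem getD_range_map {α : Type} (f : Nat → α) (n i : Nat) (d : α) (h : i < n) :
    ((List.range n).map f).getD i d = f i := by
  rw [List.getD_eq_getElem _ _ (by simp; omega)]
  simp

theorem score_eq (l : List Int) : ∀ (s : Int),
    l.foldl (fun s m => if m = 3 then s + 3 else if m = 4 then s + 8 else s + 15) s =
      l.foldl (fun s m => s + (if m = 3 then 3 else if m = 4 then 8 else 15)) s := by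
  induction l with
  | nil => intro s; rfl
  | cons m t ih =>
    intro s
    simp only [List.foldl_cons]
    rw [show (if m = 3 then s + 3 else if m = 4 then s + 8 else s + 15)
        = s + (if m = 3 then 3 else if m = 4 then (8 : Int) else 15) from by split_ifs <;> ring]
    exact ih _

-- ===== VERDICT (by name: the statement is the Claim_ definition above) =====
theorem analyze_matches_spec : Claim_equal_analyze_matches := by
  intro board _ hpre
  obtain ⟨hne, hlen⟩ := hpre
  simp only [Spec_analyze_matches, analyze_matches, analyze_matches_alt]
  have hhead : board.getD 0 [] = board.headI := by
    cases board with
    | nil => exact absurd rfl hne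
    | cons h t => rfl
  set cols := (board.getD 0 []).length with hcols
  -- horizontal part
  have hhoriz : (List.range board.length).foldl
      (fun ms r =>
        let row := board.getD r []
        finishA ((List.range' 1 (cols - 1)).foldl
          (fun st c => stepA (row.getD (c - 1) none) (row.getD c none) st) (ms, 1))) []
      = board.foldl (fun ms row => ms ++ runsB (row.take cols)) [] := by
    rw [foldl_range_getD ([] : List (Option Int))
      (fun ms row => finishA ((List.range' 1 (cols - 1)).foldl
        (fun st c => stepA (row.getD (c - 1) none) (row.getD c none) st) (ms, 1))) board]
    apply PySem.List.foldl_congr_mem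
    intro ms row hrow
    have hrl : cols ≤ row.length := by
      rw [hcols, hhead]; exact hlen row hrow
    have hlen' : (row.take cols).length = cols := by simp; omega
    have := rowEq (row.take cols) ms
    rw [hlen'] at this
    rw [← this]
    congr 1
    apply PySem.List.foldl_congr_mem
    intro st c hc
    have hcb : 1 ≤ c ∧ c < 1 + (cols - 1) := List.mem_range'_1.mp hc
    rw [getD_take row cols c none (by omega), getD_take row cols (c - 1) none (by omega)]
  rw [hhoriz]
  -- vertical part
  have hvert : ∀ (ms : List Int),
      (List.range cols).foldl
        (fun ms c =>
          finishA ((List.range' 1 (board.length - 1)).foldl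
            (fun st r => stepA ((board.getD (r - 1) []).getD c none)
              ((board.getD r []).getD c none) st) (ms, 1))) ms
      = (List.range cols).foldl
          (fun ms c => ms ++ runsB ((List.range board.length).map
            (fun r => (board.getD r []).getD c none))) ms := by
    intro ms
    apply PySem.List.foldl_congr_mem
    intro ms c _
    set colL := (List.range board.length).map (fun r => (board.getD r []).getD c none) with hcolL
    have hclen : colL.length = board.length := by simp [hcolL]
    have := rowEq colL ms
    rw [hclen] at this
    rw [← this]
    congr 1
    apply PySem.List.foldl_congr_mem
    intro st r hr
    have hrb : 1 ≤ r ∧ r < 1 + (board.length - 1) := List.mem_range'_1.mp hr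
    have hbne : 0 < board.length := List.length_pos_of_ne_nil hne
    rw [getD_range_map _ board.length r none (by omega),
        getD_range_map _ board.length (r - 1) none (by omega)]
  rw [hvert]
  -- score part
  rw [score_eq]
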